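-- pv_equiv track=rewrite | github.com/opentensor/bittensor | bittensor/_dataset/dataset_mock.py | construct_text_corpus
-- ===== SOURCE A (Python) =====
-- def construct_text_corpus(min_data_len = 0):
--     data_corpus = []
--     total_dataset_len = 0
--     i = 0
--     while (total_dataset_len < min_data_len):
--         text = "lorem ipsum data is not here this is super fake but maybe you could still learn from it?"
--         text_list = text.split()
--         data_corpus.extend(text_list)
--         total_dataset_len += len(text_list)
--         i += 1
--     return data_corpus
-- ===== SOURCE B (Python) =====
-- def construct_text_corpus(min_data_len = 0):
--     words = "lorem ipsum data is not here this is super fake but maybe you could still learn from it?".split()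
--     n = (min_data_len + len(words) - 1) // len(words) if min_data_len > 0 else 0
--     return words * n
-- ===== Notes on version B (the rewrite author's own statement) =====
-- stated objective: faster
-- what changed: Replaces the while-loop accumulation with a closed-form repetition count n = ceil(min_data_len/18) and a single list multiplication words * n.
import Mathlib
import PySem

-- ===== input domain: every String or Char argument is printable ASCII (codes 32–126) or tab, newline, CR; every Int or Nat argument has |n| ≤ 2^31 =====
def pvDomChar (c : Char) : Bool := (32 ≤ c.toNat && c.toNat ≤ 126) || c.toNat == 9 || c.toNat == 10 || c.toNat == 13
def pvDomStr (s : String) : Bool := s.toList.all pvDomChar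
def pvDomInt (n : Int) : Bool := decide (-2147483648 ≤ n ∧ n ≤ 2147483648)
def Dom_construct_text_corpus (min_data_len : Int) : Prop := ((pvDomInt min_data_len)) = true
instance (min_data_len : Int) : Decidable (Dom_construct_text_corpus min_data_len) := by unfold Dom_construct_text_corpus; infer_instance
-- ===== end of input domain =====

-- B replaces A's while-loop accumulation with a closed-form repetition count (ceil division) and one list multiplication.

-- ===== PORT A =====
-- the while-loop of A, state (data_corpus, total_dataset_len); terminates because each pass adds 18
def pvLoopA (min_data_len : Int) (data_corpus : List String) (total_dataset_len : Int) :
    List String :=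
  if total_dataset_len < min_data_len then
    let text := "lorem ipsum data is not here this is super fake but maybe you could still learn from it?"
    let text_list := PySem.Str.split₀ text
    pvLoopA min_data_len (data_corpus ++ text_list) (total_dataset_len + text_list.length)
  else data_corpus
termination_by (min_data_len - total_dataset_len).toNat
decreasing_by
  have hl : (PySem.Str.split₀ "lorem ipsum data is not here this is super fake but maybe you could still learn from it?").length = 18 := by decide
  simp only [hl]
  omega

def construct_text_corpus (min_data_len : Int) : List String :=
  pvLoopA min_data_len [] 0

-- ===== PORT B =====
def construct_text_corpus_alt (min_data_len : Int) : List String :=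
  let words := PySem.Str.split₀ "lorem ipsum data is not here this is super fake but maybe you could still learn from it?"
  let n : Int := if min_data_len > 0 then PySem.Int.floordiv (min_data_len + words.length - 1) words.length else 0
  (List.replicate n.toNat words).flatten

-- ===== PRECONDITION & SPEC =====
def Spec_construct_text_corpus (min_data_len : Int) (out : List String) : Prop := out = construct_text_corpus_alt min_data_len
instance (min_data_len : Int) (out : List String) : Decidable (Spec_construct_text_corpus min_data_len out) := by unfold Spec_construct_text_corpus; infer_instance

-- ===== CLAIM (what is proved, stated in full; the proofs are below) =====
def Claim_equal_construct_text_corpus : Prop := ∀ (min_data_len : Int), Dom_construct_text_corpus min_data_len → Spec_construct_text_corpus min_data_len (construct_text_corpus min_data_len)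

-- ===== LEMMAS AND PROOFS =====

def pvWords : List String := PySem.Str.split₀ "lorem ipsum data is not here this is super fake but maybe you could still learn from it?"

-- number of remaining iterations, closed form
def pvNeeded (min_data_len total : Int) : Nat :=
  (PySem.Int.floordiv (min_data_len - total + 17) 18).toNat

theorem pvLoopA_eq (min_data_len : Int) (acc : List String) (total : Int) :
    pvLoopA min_data_len acc total
      = acc ++ (List.replicate (pvNeeded min_data_len total) pvWords).flatten := by
  induction acc, total using pvLoopA.induct min_data_len with
  | case1 acc total h text text_list ih =>
    rw [pvLoopA]
    simp only [h, if_pos]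
    rw [ih]
    have hlen : (PySem.Str.split₀ "lorem ipsum data is not here this is super fake but maybe you could still learn from it?").length = 18 := by decide
    have hstep : pvNeeded min_data_len total
        = pvNeeded min_data_len (total + 18) + 1 := by
      unfold pvNeeded
      have h18 : (18:Int) ≠ 0 := by norm_num
      have hx : min_data_len - total + 17 = (min_data_len - (total + 18) + 17) + 1 * 18 := by ring
      rw [hx]
      have hfd : PySem.Int.floordiv ((min_data_len - (total + 18) + 17) + 1 * 18) 18
          = PySem.Int.floordiv (min_data_len - (total + 18) + 17) 18 + 1 := by
        simp only [PySem.Int.floordiv]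
        exact Int.add_mul_fdiv_right _ 1 h18
      rw [hfd]
      have hd0 : 0 ≤ PySem.Int.floordiv (min_data_len - (total + 18) + 17) 18 := by
        simp only [PySem.Int.floordiv]
        exact Int.fdiv_nonneg (by omega) (by norm_num)
      generalize PySem.Int.floordiv (min_data_len - (total + 18) + 17) 18 = d at hd0 ⊢
      omega
    simp only [text_list, text, hlen]
    norm_num
    rw [hstep]
    simp [List.replicate_succ, pvWords]
  | case2 acc total h =>
    rw [pvLoopA]
    simp only [h]
    have : pvNeeded min_data_len total = 0 := by
      unfold pvNeeded
      have : PySem.Int.floordiv (min_data_len - total + 17) 18 < 1 := by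
        rw [PySem.Int.floordiv_lt_iff_lt_mul (by norm_num)]
        omega
      omega
    simp [this]

-- ===== VERDICT (by name: the statement is the Claim_ definition above) =====
theorem construct_text_corpus_spec : Claim_equal_construct_text_corpus := by
  intro m _
  unfold Spec_construct_text_corpus construct_text_corpus construct_text_corpus_alt
  rw [pvLoopA_eq]
  have hlen : (PySem.Str.split₀ "lorem ipsum data is not here this is super fake but maybe you could still learn from it?").length = 18 := by decide
  simp only [hlen, List.nil_append]
  by_cases hm : m > 0
  · simp only [hm, if_pos]
    congr 2
    unfold pvNeeded
    congr 1
    ring_nf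
  · simp only [hm, if_neg, not_false_iff]
    have : pvNeeded m 0 = 0 := by
      unfold pvNeeded
      have : PySem.Int.floordiv (m - 0 + 17) 18 < 1 := by
        rw [PySem.Int.floordiv_lt_iff_lt_mul (by norm_num)]
        omega
      omega
    simp [pvWords] at this ⊢
    simp [this]
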